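-- pv_equiv track=rewrite | github.com/akimgnts/elevia | apps/api/src/api/utils/domain_affinity.py | infer_cv_domain
-- ===== SOURCE A (Python) =====
-- from typing import Iterable, Optional
--
-- STRONG_SIGNALS: dict[str, frozenset[str]] = {
--     "data": frozenset({
--         "skill:data_analysis", "skill:business_intelligence", "skill:machine_learning",
--         "skill:data_mining", "skill:sql", "skill:data_visualization",
--         "skill:statistical_programming", "skill:data_pipeline", "skill:data_science",
--         "skill:data_engineering", "skill:big_data", "skill:etl",
--         "skill:time_series_analysis", "skill:predictive_analytics", "skill:data_modeling",
--     }),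
--     "finance": frozenset({
--         "skill:accounting", "skill:financial_analysis", "skill:budgeting",
--         "skill:financial_reporting", "skill:audit", "skill:controlling",
--         "skill:tax", "skill:treasury", "skill:financial_modeling",
--         "skill:cost_accounting", "skill:management_accounting",
--     }),
--     "hr": frozenset({
--         "skill:recruitment", "skill:talent_acquisition", "skill:human_resources_management",
--         "skill:onboarding", "skill:talent_management", "skill:performance_management",
--         "skill:learning_and_development", "skill:compensation_and_benefits",
--         "skill:employee_relations",
--     }),
--     "marketing": frozenset({
--         "skill:digital_marketing", "skill:seo", "skill:content_marketing",
--         "skill:social_media", "skill:campaign_management", "skill:brand_management",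
--         "skill:market_analysis", "skill:public_relations", "skill:product_marketing",
--     }),
--     "sales": frozenset({
--         "skill:b2b_sales", "skill:lead_generation", "skill:account_management",
--         "skill:business_development", "skill:negotiation", "skill:sales_pitch",
--         "skill:customer_relationship_management",
--     }),
--     "supply": frozenset({
--         "skill:supply_chain_management", "skill:procurement", "skill:logistics",
--         "skill:inventory_management", "skill:warehouse_management", "skill:demand_planning",
--         "skill:supplier_management",
--     }),
--     "engineering": frozenset({
--         "skill:software_development", "skill:cloud_architecture", "skill:devops",
--         "skill:agile", "skill:mechanical_engineering", "skill:electrical_engineering",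
--         "skill:industrial_engineering", "skill:process_engineering",
--         "skill:quality_engineering", "skill:systems_engineering",
--     }),
--     "operations": frozenset({
--         "skill:operations_management", "skill:lean_management", "skill:six_sigma",
--         "skill:continuous_improvement",
--     }),
--     "legal": frozenset({
--         "skill:legal_analysis", "skill:contract_management", "skill:legal_research",
--         "skill:regulatory_affairs",
--     }),
--     "admin": frozenset({
--         "skill:office_administration", "skill:administrative_support",
--         "skill:executive_assistance",
--     }),
-- }
--
-- def infer_cv_domain(canonical_ids: Iterable[str]) -> str:
--     """Infer the dominant CV domain from a list of canonical skill IDs.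
--
--     Uses STRONG_SIGNALS only (no DB lookup at request time). A profile
--     needs at least one strong signal to be assigned a domain; otherwise
--     returns "other".
--     """
--     score: dict[str, int] = {}
--     for skill in canonical_ids:
--         if not isinstance(skill, str):
--             continue
--         for domain, members in STRONG_SIGNALS.items():
--             if skill in members:
--                 score[domain] = score.get(domain, 0) + 1
--     if not score:
--         return "other"
--     return max(score.items(), key=lambda kv: (kv[1], kv[0]))[0]
-- ===== SOURCE B (Python) =====
-- SKILL_DOMAIN: dict[str, str] = {
--     "skill:data_analysis": "data",
--     "skill:business_intelligence": "data",
--     "skill:machine_learning": "data",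
--     "skill:data_mining": "data",
--     "skill:sql": "data",
--     "skill:data_visualization": "data",
--     "skill:statistical_programming": "data",
--     "skill:data_pipeline": "data",
--     "skill:data_science": "data",
--     "skill:data_engineering": "data",
--     "skill:big_data": "data",
--     "skill:etl": "data",
--     "skill:time_series_analysis": "data",
--     "skill:predictive_analytics": "data",
--     "skill:data_modeling": "data",
--     "skill:accounting": "finance",
--     "skill:financial_analysis": "finance",
--     "skill:budgeting": "finance",
--     "skill:financial_reporting": "finance",
--     "skill:audit": "finance",
--     "skill:controlling": "finance",
--     "skill:tax": "finance",
--     "skill:treasury": "finance",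
--     "skill:financial_modeling": "finance",
--     "skill:cost_accounting": "finance",
--     "skill:management_accounting": "finance",
--     "skill:recruitment": "hr",
--     "skill:talent_acquisition": "hr",
--     "skill:human_resources_management": "hr",
--     "skill:onboarding": "hr",
--     "skill:talent_management": "hr",
--     "skill:performance_management": "hr",
--     "skill:learning_and_development": "hr",
--     "skill:compensation_and_benefits": "hr",
--     "skill:employee_relations": "hr",
--     "skill:digital_marketing": "marketing",
--     "skill:seo": "marketing",
--     "skill:content_marketing": "marketing",
--     "skill:social_media": "marketing",
--     "skill:campaign_management": "marketing",
--     "skill:brand_management": "marketing",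
--     "skill:market_analysis": "marketing",
--     "skill:public_relations": "marketing",
--     "skill:product_marketing": "marketing",
--     "skill:b2b_sales": "sales",
--     "skill:lead_generation": "sales",
--     "skill:account_management": "sales",
--     "skill:business_development": "sales",
--     "skill:negotiation": "sales",
--     "skill:sales_pitch": "sales",
--     "skill:customer_relationship_management": "sales",
--     "skill:supply_chain_management": "supply",
--     "skill:procurement": "supply",
--     "skill:logistics": "supply",
--     "skill:inventory_management": "supply",
--     "skill:warehouse_management": "supply",
--     "skill:demand_planning": "supply",
--     "skill:supplier_management": "supply",
--     "skill:software_development": "engineering",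
--     "skill:cloud_architecture": "engineering",
--     "skill:devops": "engineering",
--     "skill:agile": "engineering",
--     "skill:mechanical_engineering": "engineering",
--     "skill:electrical_engineering": "engineering",
--     "skill:industrial_engineering": "engineering",
--     "skill:process_engineering": "engineering",
--     "skill:quality_engineering": "engineering",
--     "skill:systems_engineering": "engineering",
--     "skill:operations_management": "operations",
--     "skill:lean_management": "operations",
--     "skill:six_sigma": "operations",
--     "skill:continuous_improvement": "operations",
--     "skill:legal_analysis": "legal",
--     "skill:contract_management": "legal",
--     "skill:legal_research": "legal",
--     "skill:regulatory_affairs": "legal",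
--     "skill:office_administration": "admin",
--     "skill:administrative_support": "admin",
--     "skill:executive_assistance": "admin",
-- }
--
-- def infer_cv_domain(canonical_ids):
--     """Infer the dominant CV domain via a flat reverse index (skill -> domain):
--     one lookup per skill, then a running-best scan of the tally."""
--     tally: dict[str, int] = {}
--     for s in canonical_ids:
--         if isinstance(s, str):
--             d = SKILL_DOMAIN.get(s)
--             if d is not None:
--                 tally[d] = tally.get(d, 0) + 1
--     best, best_n = "other", 0
--     for d, n in tally.items():
--         if best_n < n or (best_n == n and best < d):
--             best, best_n = d, n
--     return best
-- ===== Notes on version B (the rewrite author's own statement) =====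
-- stated objective: faster
-- what changed: Replaces A's per-skill scan over all ten domain sets with a flat reverse index (skill -> domain) built as a module constant, so each skill costs one dict lookup, and replaces max over the score dict with a running-best (domain, count) scan of the tally.
import Mathlib
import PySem

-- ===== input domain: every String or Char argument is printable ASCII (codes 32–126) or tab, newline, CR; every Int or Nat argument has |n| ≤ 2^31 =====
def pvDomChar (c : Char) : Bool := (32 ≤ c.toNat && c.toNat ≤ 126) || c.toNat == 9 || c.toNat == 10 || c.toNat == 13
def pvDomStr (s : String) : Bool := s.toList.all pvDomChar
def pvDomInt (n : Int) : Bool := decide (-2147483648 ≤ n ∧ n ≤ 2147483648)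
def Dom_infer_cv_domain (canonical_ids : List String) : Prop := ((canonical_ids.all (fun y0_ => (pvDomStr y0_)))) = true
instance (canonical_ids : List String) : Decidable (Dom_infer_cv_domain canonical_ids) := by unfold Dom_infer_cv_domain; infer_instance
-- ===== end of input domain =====

-- ===== PORT A =====
-- B replaces A's per-skill scan over all domains by a flat reverse index (skill -> domain),
-- one lookup per skill, and a running-best scan instead of max over the score dict.
-- module constant STRONG_SIGNALS (both programs only test membership, so member-list order is irrelevant)
def pvSignals : List (String × List String) := [
  ("data", ["skill:data_analysis", "skill:business_intelligence", "skill:machine_learning",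
    "skill:data_mining", "skill:sql", "skill:data_visualization",
    "skill:statistical_programming", "skill:data_pipeline", "skill:data_science",
    "skill:data_engineering", "skill:big_data", "skill:etl",
    "skill:time_series_analysis", "skill:predictive_analytics", "skill:data_modeling"]),
  ("finance", ["skill:accounting", "skill:financial_analysis", "skill:budgeting",
    "skill:financial_reporting", "skill:audit", "skill:controlling",
    "skill:tax", "skill:treasury", "skill:financial_modeling",
    "skill:cost_accounting", "skill:management_accounting"]),
  ("hr", ["skill:recruitment", "skill:talent_acquisition", "skill:human_resources_management",
    "skill:onboarding", "skill:talent_management", "skill:performance_management",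
    "skill:learning_and_development", "skill:compensation_and_benefits",
    "skill:employee_relations"]),
  ("marketing", ["skill:digital_marketing", "skill:seo", "skill:content_marketing",
    "skill:social_media", "skill:campaign_management", "skill:brand_management",
    "skill:market_analysis", "skill:public_relations", "skill:product_marketing"]),
  ("sales", ["skill:b2b_sales", "skill:lead_generation", "skill:account_management",
    "skill:business_development", "skill:negotiation", "skill:sales_pitch",
    "skill:customer_relationship_management"]),
  ("supply", ["skill:supply_chain_management", "skill:procurement", "skill:logistics",
    "skill:inventory_management", "skill:warehouse_management", "skill:demand_planning",
    "skill:supplier_management"]),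
  ("engineering", ["skill:software_development", "skill:cloud_architecture", "skill:devops",
    "skill:agile", "skill:mechanical_engineering", "skill:electrical_engineering",
    "skill:industrial_engineering", "skill:process_engineering",
    "skill:quality_engineering", "skill:systems_engineering"]),
  ("operations", ["skill:operations_management", "skill:lean_management", "skill:six_sigma",
    "skill:continuous_improvement"]),
  ("legal", ["skill:legal_analysis", "skill:contract_management", "skill:legal_research",
    "skill:regulatory_affairs"]),
  ("admin", ["skill:office_administration", "skill:administrative_support",
    "skill:executive_assistance"])]

-- A: per-skill loop over all domains updating score[domain] (the `isinstance(skill, str)` guard is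
-- always true under the List String typing); then max(score.items(), key=lambda kv: (kv[1], kv[0]))[0].
def infer_cv_domain (canonical_ids : List String) : String :=
  let score : PySem.Dict String Int :=
    canonical_ids.foldl (fun sc skill =>
      pvSignals.foldl (fun sc dm =>
        if skill ∈ dm.2 then sc.modify dm.1 0 (· + 1) else sc) sc)
      PySem.Dict.empty
  if score.items.isEmpty then "other"
  else
    match PySem.List.max2? score.items (fun kv => kv.2) (fun kv => kv.1) with
    | some kv => kv.1
    | none => "other"   -- unreachable: score is nonempty here

-- ===== PORT B =====
-- Source B's module constant SKILL_DOMAIN: the flat reverse index skill -> domain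
def pvSkillDomain : PySem.Dict String String := PySem.Dict.mk [
  ("skill:data_analysis", "data"),
  ("skill:business_intelligence", "data"),
  ("skill:machine_learning", "data"),
  ("skill:data_mining", "data"),
  ("skill:sql", "data"),
  ("skill:data_visualization", "data"),
  ("skill:statistical_programming", "data"),
  ("skill:data_pipeline", "data"),
  ("skill:data_science", "data"),
  ("skill:data_engineering", "data"),
  ("skill:big_data", "data"),
  ("skill:etl", "data"),
  ("skill:time_series_analysis", "data"),
  ("skill:predictive_analytics", "data"),
  ("skill:data_modeling", "data"),
  ("skill:accounting", "finance"),
  ("skill:financial_analysis", "finance"),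
  ("skill:budgeting", "finance"),
  ("skill:financial_reporting", "finance"),
  ("skill:audit", "finance"),
  ("skill:controlling", "finance"),
  ("skill:tax", "finance"),
  ("skill:treasury", "finance"),
  ("skill:financial_modeling", "finance"),
  ("skill:cost_accounting", "finance"),
  ("skill:management_accounting", "finance"),
  ("skill:recruitment", "hr"),
  ("skill:talent_acquisition", "hr"),
  ("skill:human_resources_management", "hr"),
  ("skill:onboarding", "hr"),
  ("skill:talent_management", "hr"),
  ("skill:performance_management", "hr"),
  ("skill:learning_and_development", "hr"),
  ("skill:compensation_and_benefits", "hr"),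
  ("skill:employee_relations", "hr"),
  ("skill:digital_marketing", "marketing"),
  ("skill:seo", "marketing"),
  ("skill:content_marketing", "marketing"),
  ("skill:social_media", "marketing"),
  ("skill:campaign_management", "marketing"),
  ("skill:brand_management", "marketing"),
  ("skill:market_analysis", "marketing"),
  ("skill:public_relations", "marketing"),
  ("skill:product_marketing", "marketing"),
  ("skill:b2b_sales", "sales"),
  ("skill:lead_generation", "sales"),
  ("skill:account_management", "sales"),
  ("skill:business_development", "sales"),
  ("skill:negotiation", "sales"),
  ("skill:sales_pitch", "sales"),
  ("skill:customer_relationship_management", "sales"),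
  ("skill:supply_chain_management", "supply"),
  ("skill:procurement", "supply"),
  ("skill:logistics", "supply"),
  ("skill:inventory_management", "supply"),
  ("skill:warehouse_management", "supply"),
  ("skill:demand_planning", "supply"),
  ("skill:supplier_management", "supply"),
  ("skill:software_development", "engineering"),
  ("skill:cloud_architecture", "engineering"),
  ("skill:devops", "engineering"),
  ("skill:agile", "engineering"),
  ("skill:mechanical_engineering", "engineering"),
  ("skill:electrical_engineering", "engineering"),
  ("skill:industrial_engineering", "engineering"),
  ("skill:process_engineering", "engineering"),
  ("skill:quality_engineering", "engineering"),
  ("skill:systems_engineering", "engineering"),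
  ("skill:operations_management", "operations"),
  ("skill:lean_management", "operations"),
  ("skill:six_sigma", "operations"),
  ("skill:continuous_improvement", "operations"),
  ("skill:legal_analysis", "legal"),
  ("skill:contract_management", "legal"),
  ("skill:legal_research", "legal"),
  ("skill:regulatory_affairs", "legal"),
  ("skill:office_administration", "admin"),
  ("skill:administrative_support", "admin"),
  ("skill:executive_assistance", "admin")]

-- B: tally[d] += 1 per reverse lookup, then a running-best (best, best_n) scan of tally.items()
def infer_cv_domain_alt (canonical_ids : List String) : String :=
  let tally : PySem.Dict String Int :=
    canonical_ids.foldl (fun t s =>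
      match pvSkillDomain.get? s with
      | some d => t.modify d 0 (· + 1)
      | none => t) PySem.Dict.empty
  let best : String × Int :=
    tally.items.foldl (fun bn dn =>
      if (decide (bn.2 < dn.2) || (decide (bn.2 = dn.2) && decide (bn.1 < dn.1))) = true
      then (dn.1, dn.2) else bn) ("other", 0)
  best.1

-- ===== PRECONDITION & SPEC =====
def Spec_infer_cv_domain (canonical_ids : List String) (out : String) : Prop := out = infer_cv_domain_alt canonical_ids
instance (canonical_ids : List String) (out : String) : Decidable (Spec_infer_cv_domain canonical_ids out) := by unfold Spec_infer_cv_domain; infer_instance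

-- ===== CLAIM =====
def Claim_equal_infer_cv_domain : Prop := ∀ (canonical_ids : List String), Dom_infer_cv_domain canonical_ids → Spec_infer_cv_domain canonical_ids (infer_cv_domain canonical_ids)

-- ===== LEMMAS AND PROOFS =====

-- A's and B's dict-building folds, named for the proofs
def AScore (l : List String) : PySem.Dict String Int :=
  l.foldl (fun sc skill =>
    pvSignals.foldl (fun sc dm =>
      if skill ∈ dm.2 then sc.modify dm.1 0 (· + 1) else sc) sc)
    PySem.Dict.empty

def BTally (l : List String) : PySem.Dict String Int :=
  l.foldl (fun t s =>
    match pvSkillDomain.get? s with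
    | some d => t.modify d 0 (· + 1)
    | none => t) PySem.Dict.empty

-- the reverse index of a signals table, and plain assoc-list lookup
def revIdx (sigs : List (String × List String)) : List (String × String) :=
  sigs.flatMap (fun dm => dm.2.map (fun s => (s, dm.1)))

def lk (l : List (String × String)) (x : String) : Option String :=
  match l with
  | [] => none
  | (k, v) :: t => if k == x then some v else lk t x

theorem pvSkillDomain_eq : pvSkillDomain = PySem.Dict.mk (revIdx pvSignals) := by decide

theorem pvFlatNodup : ((revIdx pvSignals).map Prod.fst).Nodup := by decide

theorem get?_mk_eq_lk (l : List (String × String)) (x : String) :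
    (PySem.Dict.mk l).get? x = lk l x := by
  induction l with
  | nil => rfl
  | cons p t ih =>
    cases p
    rw [PySem.Dict.get?_mk_cons, lk, ih]

theorem lk_append (l1 l2 : List (String × String)) (x : String) :
    lk (l1 ++ l2) x = match lk l1 x with | some v => some v | none => lk l2 x := by
  induction l1 with
  | nil => rfl
  | cons p t ih =>
    cases p with
    | mk k v =>
      by_cases h : k == x
      · simp [lk, h]
      · simp only [List.cons_append, lk, h, Bool.false_eq_true, if_false, ih]

theorem lk_block_mem (ms : List String) (d skill : String) (h : skill ∈ ms) :
    lk (ms.map (fun s => (s, d))) skill = some d := by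
  induction ms with
  | nil => cases h
  | cons a t ih =>
    rcases List.mem_cons.1 h with rfl | ht
    · simp [lk]
    · by_cases ha : a == skill
      · simp [lk, ha]
      · simp only [List.map_cons, lk, ha, Bool.false_eq_true, if_false]
        exact ih ht

theorem lk_block_not_mem (ms : List String) (d skill : String) (h : skill ∉ ms) :
    lk (ms.map (fun s => (s, d))) skill = none := by
  induction ms with
  | nil => rfl
  | cons a t ih =>
    have ha : ¬ (a == skill) = true := by
      simp only [beq_iff_eq]
      rintro rfl
      exact h List.mem_cons_self
    simp only [List.map_cons, lk, ha, Bool.false_eq_true, if_false]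
    exact ih fun hm => h (List.mem_cons_of_mem _ hm)

theorem foldA_skip (sigs : List (String × List String)) (skill : String)
    (h : ∀ dm ∈ sigs, skill ∉ dm.2) (sc : PySem.Dict String Int) :
    sigs.foldl (fun sc dm => if skill ∈ dm.2 then sc.modify dm.1 0 (· + 1) else sc) sc = sc := by
  induction sigs generalizing sc with
  | nil => rfl
  | cons dm t ih =>
    rw [List.foldl_cons, if_neg (h dm List.mem_cons_self)]
    exact ih (fun d hd => h d (List.mem_cons_of_mem _ hd)) sc

-- the key step: A's inner scan over the table = one reverse-index lookup
theorem inner_eq_lookup (sigs : List (String × List String))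
    (hnd : ((revIdx sigs).map Prod.fst).Nodup) (skill : String) (sc : PySem.Dict String Int) :
    sigs.foldl (fun sc dm => if skill ∈ dm.2 then sc.modify dm.1 0 (· + 1) else sc) sc
      = match lk (revIdx sigs) skill with
        | some d => sc.modify d 0 (· + 1)
        | none => sc := by
  induction sigs generalizing sc with
  | nil => rfl
  | cons dm t ih =>
    have hrev : revIdx (dm :: t) = dm.2.map (fun s => (s, dm.1)) ++ revIdx t := rfl
    rw [hrev, List.map_append] at hnd
    rcases List.nodup_append.1 hnd with ⟨hn1, hn2, hdisj⟩
    rw [List.foldl_cons, hrev, lk_append]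
    by_cases hm : skill ∈ dm.2
    · rw [if_pos hm, lk_block_mem dm.2 dm.1 skill hm]
      have hskip : ∀ dm' ∈ t, skill ∉ dm'.2 := by
        intro dm' hdm' hmem
        have h1 : skill ∈ (dm.2.map (fun s => (s, dm.1))).map Prod.fst := by
          simp only [List.map_map]
          exact List.mem_map.2 ⟨skill, hm, rfl⟩
        have h2 : skill ∈ (revIdx t).map Prod.fst := by
          refine List.mem_map.2 ⟨(skill, dm'.1), ?_, rfl⟩
          exact List.mem_flatMap.2 ⟨dm', hdm', List.mem_map.2 ⟨skill, hmem, rfl⟩⟩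
        exact hdisj skill h1 skill h2 rfl
      exact foldA_skip t skill hskip _
    · rw [if_neg hm, lk_block_not_mem dm.2 dm.1 skill hm]
      exact ih hn2 sc

theorem BTally_eq_AScore (l : List String) : BTally l = AScore l := by
  unfold BTally AScore
  congr 1
  funext sc skill
  rw [pvSkillDomain_eq, get?_mk_eq_lk, inner_eq_lookup pvSignals pvFlatNodup skill sc]

-- BTally's lookups and keys
theorem BTally_getD (l : List String) (sc : PySem.Dict String Int) (d : String) :
    (l.foldl (fun t s => match pvSkillDomain.get? s with
        | some d => t.modify d 0 (· + 1) | none => t) sc).getD d 0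
      = sc.getD d 0 + (l.countP (fun s => pvSkillDomain.get? s == some d) : Int) := by
  induction l generalizing sc with
  | nil => simp
  | cons x xs ih =>
    rw [List.foldl_cons, List.countP_cons, ih]
    cases hx : pvSkillDomain.get? x with
    | none =>
      simp [hx]
    | some d' =>
      by_cases hd : d' = d
      · subst hd
        simp [hx, PySem.Dict.getD_modify]
        push_cast
        ring
      · have : ¬ (d = d') := fun h => hd h.symm
        simp [hx, PySem.Dict.getD_modify, this, hd]

theorem BTally_contains (l : List String) (sc : PySem.Dict String Int) (d : String) :
    (l.foldl (fun t s => match pvSkillDomain.get? s with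
        | some d => t.modify d 0 (· + 1) | none => t) sc).contains d
      = (sc.contains d || l.any (fun s => pvSkillDomain.get? s == some d)) := by
  induction l generalizing sc with
  | nil => simp
  | cons x xs ih =>
    rw [List.foldl_cons, List.any_cons, ih]
    cases hx : pvSkillDomain.get? x with
    | none => simp [hx]
    | some d' =>
      by_cases hd : d = d'
      · subst hd
        simp [hx, PySem.Dict.contains_modify]
      · have hb : (d' == d) = false := beq_eq_false_iff_ne.2 (fun h => hd h.symm)
        have hb2 : (d == d') = false := beq_eq_false_iff_ne.2 hd
        simp [PySem.Dict.contains_modify, hb, hb2]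

theorem BTally_nodup (l : List String) (sc : PySem.Dict String Int) (h : sc.keys.Nodup) :
    (l.foldl (fun t s => match pvSkillDomain.get? s with
        | some d => t.modify d 0 (· + 1) | none => t) sc).keys.Nodup := by
  induction l generalizing sc with
  | nil => exact h
  | cons x xs ih =>
    rw [List.foldl_cons]
    apply ih
    cases hx : pvSkillDomain.get? x with
    | none => simpa [hx] using h
    | some d =>
      simpa [hx, PySem.Dict.keys_modify] using PySem.Dict.nodup_keys_insert _ _ _ h

-- every recorded value is positive
theorem items_pos (l : List String) (p : String × Int) (hp : p ∈ (BTally l).items) : 0 < p.2 := by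
  have hnd : (BTally l).keys.Nodup := BTally_nodup l PySem.Dict.empty (by simp [PySem.Dict.keys_empty])
  cases p with
  | mk k v =>
    have hv : (BTally l).getD k 0 = v := PySem.Dict.getD_of_mem_items _ hp hnd 0
    have hc : (BTally l).contains k = true := by
      rw [PySem.Dict.contains_iff_mem_keys]
      exact PySem.Dict.mem_keys_of_mem_items _ hp
    unfold BTally at hv hc
    rw [BTally_getD] at hv
    rw [BTally_contains] at hc
    simp only [PySem.Dict.contains_empty, Bool.false_or, List.any_eq_true] at hc
    rcases hc with ⟨s, hs, hsd⟩
    have : 0 < l.countP (fun s => pvSkillDomain.get? s == some k) :=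
      List.countP_pos_iff.2 ⟨s, hs, hsd⟩
    simp only [PySem.Dict.getD_empty, zero_add] at hv
    simp only [← hv]
    exact_mod_cast this

-- both tails maximise the same lexicographic key (count, name)
def KA (p : String × Int) : Lex (Int × String) := toLex (p.2, p.1)

def maxStep {α : Type} (key : α → Lex (Int × String)) (acc : Option α) (x : α) : Option α :=
  match acc with
  | none => some x
  | some m => if key m < key x then some x else some m

theorem KA_lt_iff (m x : String × Int) :
    KA m < KA x ↔ (m.2 < x.2 ∨ (m.2 = x.2 ∧ m.1 < x.1)) := by
  rw [KA, KA, Prod.Lex.lt_iff]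
  simp

theorem KA_inj (m x : String × Int) (h : KA m = KA x) : m = x := by
  have := congrArg (fun y : Lex (Int × String) => ofLex y) h
  simp only [KA, ofLex_toLex] at this
  cases m; cases x
  simp_all [Prod.ext_iff]

-- A's max2? is the canonical max-fold with key KA
theorem A_max_eq (xs : List (String × Int)) :
    PySem.List.max2? xs (fun kv => kv.2) (fun kv => kv.1) = xs.foldl (maxStep KA) none := by
  unfold PySem.List.max2?
  congr 1
  funext acc x
  cases acc with
  | none => rfl
  | some m =>
    show (if (decide (m.2 < x.2) || (!decide (x.2 < m.2) && decide (m.1 < x.1))) = true then some x else some m) = _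
    by_cases h : KA m < KA x
    · rw [if_pos ?_, maxStep, if_pos h]
      rw [KA_lt_iff] at h
      simp only [Bool.or_eq_true, Bool.and_eq_true, Bool.not_eq_true', decide_eq_true_eq,
        decide_eq_false_iff_not]
      rcases h with h | ⟨h1, h2⟩
      · exact Or.inl h
      · exact Or.inr ⟨by omega, h2⟩
    · rw [if_neg ?_, maxStep, if_neg h]
      rw [KA_lt_iff] at h
      simp only [Bool.or_eq_true, Bool.and_eq_true, Bool.not_eq_true', decide_eq_true_eq,
        decide_eq_false_iff_not]
      rintro (h' | ⟨h1, h2⟩)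
      · exact h (Or.inl h')
      · exact h (Or.inr ⟨by omega, h2⟩)

theorem maxRun_some {α : Type} (key : α → Lex (Int × String)) (xs : List α) (m0 : α) :
    ∃ m, xs.foldl (maxStep key) (some m0) = some m ∧ (m = m0 ∨ m ∈ xs) ∧ key m0 ≤ key m ∧ ∀ y ∈ xs, key y ≤ key m := by
  induction xs generalizing m0 with
  | nil => exact ⟨m0, rfl, Or.inl rfl, le_refl _, by simp⟩
  | cons x t ih =>
    by_cases h : key m0 < key x
    · rcases ih x with ⟨m, hm, hmem, hle, hall⟩
      refine ⟨m, by simpa [maxStep, h] using hm, ?_, le_of_lt (lt_of_lt_of_le h hle), ?_⟩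
      · rcases hmem with rfl | hmt
        · exact Or.inr List.mem_cons_self
        · exact Or.inr (List.mem_cons_of_mem _ hmt)
      · intro y hy
        rcases List.mem_cons.1 hy with rfl | hyt
        · exact hle
        · exact hall y hyt
    · rcases ih m0 with ⟨m, hm, hmem, hle, hall⟩
      refine ⟨m, by simpa [maxStep, h] using hm, ?_, hle, ?_⟩
      · rcases hmem with rfl | hmt
        · exact Or.inl rfl
        · exact Or.inr (List.mem_cons_of_mem _ hmt)
      · intro y hy
        rcases List.mem_cons.1 hy with rfl | hyt
        · exact le_trans (not_lt.1 h) hle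
        · exact hall y hyt

-- B's running-best fold is the seeded max-fold with key KA
theorem B_fold_is_seeded (xs : List (String × Int)) (s0 : String × Int) :
    xs.foldl (fun bn dn =>
      if (decide (bn.2 < dn.2) || (decide (bn.2 = dn.2) && decide (bn.1 < dn.1))) = true
      then (dn.1, dn.2) else bn) s0
      = xs.foldl (fun acc x => if KA acc < KA x then x else acc) s0 := by
  apply PySem.List.foldl_congr_mem
  intro acc x _
  by_cases h : KA acc < KA x
  · have hc : (decide (acc.2 < x.2) || (decide (acc.2 = x.2) && decide (acc.1 < x.1))) = true := by
      rw [KA_lt_iff] at h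
      simpa using h
    rw [if_pos hc, if_pos h]
  · have hc : ¬ (decide (acc.2 < x.2) || (decide (acc.2 = x.2) && decide (acc.1 < x.1))) = true := by
      rw [KA_lt_iff] at h
      simpa using h
    rw [if_neg hc, if_neg h]

theorem seedRun (xs : List (String × Int)) (s0 : String × Int) :
    ∃ m, xs.foldl (fun acc x => if KA acc < KA x then x else acc) s0 = m ∧
      (m = s0 ∨ m ∈ xs) ∧ KA s0 ≤ KA m ∧ ∀ y ∈ xs, KA y ≤ KA m := by
  induction xs generalizing s0 with
  | nil => exact ⟨s0, rfl, Or.inl rfl, le_refl _, by simp⟩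
  | cons x t ih =>
    by_cases h : KA s0 < KA x
    · rcases ih x with ⟨m, hm, hmem, hle, hall⟩
      refine ⟨m, by simpa [h] using hm, ?_, le_of_lt (lt_of_lt_of_le h hle), ?_⟩
      · rcases hmem with rfl | hmt
        · exact Or.inr List.mem_cons_self
        · exact Or.inr (List.mem_cons_of_mem _ hmt)
      · intro y hy
        rcases List.mem_cons.1 hy with rfl | hyt
        · exact hle
        · exact hall y hyt
    · rcases ih s0 with ⟨m, hm, hmem, hle, hall⟩
      refine ⟨m, by simpa [h] using hm, ?_, hle, ?_⟩
      · rcases hmem with rfl | hmt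
        · exact Or.inl rfl
        · exact Or.inr (List.mem_cons_of_mem _ hmt)
      intro y hy
      rcases List.mem_cons.1 hy with rfl | hyt
      · exact le_trans (not_lt.1 h) hle
      · exact hall y hyt

-- ===== VERDICT =====
theorem infer_cv_domain_spec : Claim_equal_infer_cv_domain := by
  intro l _hdom
  unfold Spec_infer_cv_domain
  have hA : infer_cv_domain l =
      (if (AScore l).items.isEmpty then "other"
       else match PySem.List.max2? (AScore l).items (fun kv => kv.2) (fun kv => kv.1) with
            | some kv => kv.1
            | none => "other") := rfl
  have hB : infer_cv_domain_alt l =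
      ((BTally l).items.foldl (fun bn dn =>
        if (decide (bn.2 < dn.2) || (decide (bn.2 = dn.2) && decide (bn.1 < dn.1))) = true
        then (dn.1, dn.2) else bn) ("other", 0)).1 := rfl
  rw [hA, hB, BTally_eq_AScore, B_fold_is_seeded]
  cases hit : (AScore l).items with
  | nil => simp [hit]
  | cons i it =>
    rw [if_neg (by simp)]
    rw [A_max_eq, List.foldl_cons, List.foldl_cons]
    have hstepA : maxStep KA none i = some i := rfl
    rw [hstepA]
    have hipos : 0 < i.2 := by
      apply items_pos l i
      rw [BTally_eq_AScore, hit]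
      exact List.mem_cons_self
    have hseed : KA ("other", 0) < KA i := by
      rw [KA_lt_iff]
      left
      simpa using hipos
    have hseedstep : (if KA (("other" : String), (0 : Int)) < KA i then i else ("other", 0)) = i := if_pos hseed
    rw [hseedstep]
    rcases maxRun_some KA it i with ⟨mA, hmA, hmemA, hleA, hallA⟩
    rcases seedRun it i with ⟨mB, hmB, hmemB, hleB, hallB⟩
    rw [hmA, hmB]
    show mA.1 = mB.1
    have hmemA' : mA ∈ i :: it := by
      rcases hmemA with rfl | h
      · exact List.mem_cons_self
      · exact List.mem_cons_of_mem _ h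
    have hmemB' : mB ∈ i :: it := by
      rcases hmemB with rfl | h
      · exact List.mem_cons_self
      · exact List.mem_cons_of_mem _ h
    have h1 : KA mA ≤ KA mB := by
      rcases List.mem_cons.1 hmemA' with rfl | h
      · exact hleB
      · exact hallB mA h
    have h2 : KA mB ≤ KA mA := by
      rcases List.mem_cons.1 hmemB' with rfl | h
      · exact hleA
      · exact hallA mB h
    rw [KA_inj mA mB (le_antisymm h1 h2)]
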